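-- pv_equiv track=rewrite | github.com/RGeex/tasks | randomes/strings/get_the_vowels.py | get_the_vowels_1
-- ===== SOURCE A (Python) =====
-- def get_the_vowels_1(word: str) -> int:
--     """
--     Поиск длины максимальной последовательности гласных баукв.
--     """
--     tmp, res = 'aeiou', []
--     for s in word:
--         if s in tmp:
--             for i, x in enumerate(res):
--                 if tmp[tmp.index(s) - 1] == x[-1:]:
--                     res[i] += s
--             if s == tmp[:1]:
--                 res.append(s)
--     return max(map(len, res), default=0)
-- ===== SOURCE B (Python) =====
-- def get_the_vowels_1(word: str) -> int:
--     # Single pass: ex = max length of any chain whose next expected vowel is x (0 = none).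
--     ea = ee = ei = eo = eu = 0
--     for c in word:
--         if c == 'a':
--             ee = max(ee, ea + 1 if ea else 1)
--             ea = 0
--         elif c == 'e':
--             if ee:
--                 ei = max(ei, ee + 1)
--             ee = 0
--         elif c == 'i':
--             if ei:
--                 eo = max(eo, ei + 1)
--             ei = 0
--         elif c == 'o':
--             if eo:
--                 eu = max(eu, eo + 1)
--             eo = 0
--         elif c == 'u':
--             if eu:
--                 ea = max(ea, eu + 1)
--             eu = 0
--     return max(ea, ee, ei, eo, eu)
-- ===== Notes on version B (the rewrite author's own statement) =====
-- stated objective: faster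
-- what changed: A keeps a growing list of chain strings and rescans and extends all of them for every vowel; B does a single pass keeping only five running maxima (best chain length per next-expected vowel), never materialising the chains.
import Mathlib
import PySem

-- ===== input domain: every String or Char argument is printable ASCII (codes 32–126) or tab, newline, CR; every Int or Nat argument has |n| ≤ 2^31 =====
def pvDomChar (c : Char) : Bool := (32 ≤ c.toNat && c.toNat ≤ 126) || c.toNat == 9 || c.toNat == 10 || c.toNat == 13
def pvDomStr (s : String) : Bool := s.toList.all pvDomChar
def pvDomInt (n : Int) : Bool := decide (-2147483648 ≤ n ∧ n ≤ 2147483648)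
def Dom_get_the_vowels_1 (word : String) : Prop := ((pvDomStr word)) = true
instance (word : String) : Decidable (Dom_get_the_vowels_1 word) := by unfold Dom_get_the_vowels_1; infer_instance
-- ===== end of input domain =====

-- B replaces A's quadratic list of growing chain strings by five running maxima
-- (one per "next expected vowel"), a single O(n) pass (objective: faster).

-- ===== PORT A =====
def pvVowels : List Char := ['a', 'e', 'i', 'o', 'u']

-- tmp[tmp.index(s) - 1] (negative index wraps, as in Python)
def pvPred (s : Char) : Char :=
  PySem.List.pyGetD pvVowels (((PySem.List.index? pvVowels s).getD 0 : Int) - 1) ' '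

-- body of A's outer loop: extend every chain whose last char matches, then maybe start a new chain
def pvStepA (res : List (List Char)) (s : Char) : List (List Char) :=
  if s ∈ pvVowels then
    let res' := res.map
      (fun x => if [pvPred s] = PySem.List.slice x (some (-1)) none then x ++ [s] else x)
    if s = 'a' then res' ++ [['a']] else res'
  else res

def get_the_vowels_1 (word : String) : Int :=
  let res := word.toList.foldl pvStepA []
  (PySem.List.max? (res.map (fun x => (x.length : Int))) (fun y => y)).getD 0

-- ===== PORT B =====
-- state (ea, ee, ei, eo, eu): max length of a chain whose next expected vowel is a/e/i/o/u (0 = none)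
def pvStepB (st : Int × Int × Int × Int × Int) (c : Char) : Int × Int × Int × Int × Int :=
  let (ea, ee, ei, eo, eu) := st
  if c = 'a' then (0, max ee (if ea ≠ 0 then ea + 1 else 1), ei, eo, eu)
  else if c = 'e' then (ea, 0, if ee ≠ 0 then max ei (ee + 1) else ei, eo, eu)
  else if c = 'i' then (ea, ee, 0, if ei ≠ 0 then max eo (ei + 1) else eo, eu)
  else if c = 'o' then (ea, ee, ei, 0, if eo ≠ 0 then max eu (eo + 1) else eu)
  else if c = 'u' then (if eu ≠ 0 then max ea (eu + 1) else ea, ee, ei, eo, 0)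
  else st

def get_the_vowels_1_alt (word : String) : Int :=
  let st := word.toList.foldl pvStepB (0, 0, 0, 0, 0)
  max st.1 (max st.2.1 (max st.2.2.1 (max st.2.2.2.1 st.2.2.2.2)))

-- ===== PRECONDITION & SPEC =====
def Spec_get_the_vowels_1 (word : String) (out : Int) : Prop := out = get_the_vowels_1_alt word
instance (word : String) (out : Int) : Decidable (Spec_get_the_vowels_1 word out) := by unfold Spec_get_the_vowels_1; infer_instance

-- ===== CLAIM (what is proved, stated in full; the proofs are below) =====
def Claim_equal_get_the_vowels_1 : Prop := ∀ (word : String), Dom_get_the_vowels_1 word → Spec_get_the_vowels_1 word (get_the_vowels_1 word)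

-- ===== LEMMAS AND PROOFS =====

-- every chain in A's res is a prefix of the periodic word aeiouaeiou…; chainOf n is that prefix of length n
def pvAt (r : Nat) : Char := pvVowels.getD r ' '
def chainOf (n : Nat) : List Char := (List.range n).map (fun i => pvAt (i % 5))

-- abstract step on the list of chain lengths
def gBump (j : Nat) (n : Nat) : Nat := if n % 5 = j then n + 1 else n
def stepL (j : Nat) (L : List Nat) : List Nat :=
  (L.map (gBump j)) ++ (if j = 0 then [1] else [])

-- M L r: max length among chains with length ≡ r (mod 5); 0 if none
def M (L : List Nat) (r : Nat) : Int :=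
  L.foldr (fun n acc => if n % 5 = r then max (n : Int) acc else acc) 0

lemma M_cons (n : Nat) (L : List Nat) (r : Nat) :
    M (n :: L) r = if n % 5 = r then max (n : Int) (M L r) else M L r := rfl

lemma M_nonneg (L : List Nat) (r : Nat) : 0 ≤ M L r := by
  induction L with
  | nil => simp [M]
  | cons n L ih =>
    rw [M_cons]
    split
    · exact le_trans ih (le_max_right _ _)
    · exact ih

lemma chainOf_length (n : Nat) : (chainOf n).length = n := by simp [chainOf]

lemma chainOf_succ (n : Nat) : chainOf (n + 1) = chainOf n ++ [pvAt (n % 5)] := by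
  simp [chainOf, List.range_succ]

lemma chainOf_last (n : Nat) (h : 0 < n) :
    PySem.List.slice (chainOf n) (some (-1)) none = [pvAt ((n - 1) % 5)] := by
  obtain ⟨m, rfl⟩ := Nat.exists_eq_add_of_lt h
  rw [PySem.List.slice_from_neg_one]
  simp [chainOf_succ, chainOf_length]

-- condition in A's inner loop, for a chain of length n and vowel index j
lemma cond_iff (j : Nat) (hj : j < 5) (n : Nat) (hn : 0 < n) :
    ([pvPred (pvAt j)] = PySem.List.slice (chainOf n) (some (-1)) none) ↔ n % 5 = j := by
  rw [chainOf_last n hn]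
  have h5 : (n - 1) % 5 < 5 := Nat.mod_lt _ (by norm_num)
  have hr : (n - 1) % 5 = (n - 1) % 5 := rfl
  set r := (n - 1) % 5 with hr
  interval_cases j <;> interval_cases r <;>
    refine ⟨fun hc => ?_, fun hc => ?_⟩ <;>
      first
        | (exfalso; revert hc; decide)
        | (exfalso; omega)
        | omega
        | decide

lemma extend_eq (j : Nat) (hj : j < 5) (n : Nat) (hn : n % 5 = j) :
    chainOf n ++ [pvAt j] = chainOf (n + 1) := by
  rw [chainOf_succ, hn]

-- the map part of A's step, on lengths
lemma stepA_map (j : Nat) (hj : j < 5) (L : List Nat) (hpos : ∀ n ∈ L, 0 < n) :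
    (L.map chainOf).map
      (fun x => if [pvPred (pvAt j)] = PySem.List.slice x (some (-1)) none
                then x ++ [pvAt j] else x)
    = (L.map (gBump j)).map chainOf := by
  induction L with
  | nil => simp
  | cons n L ih =>
    have hn : 0 < n := hpos n (by simp)
    have ih' := ih (fun m hm => hpos m (by simp [hm]))
    simp only [List.map_cons, List.cons.injEq]
    refine ⟨?_, ih'⟩
    by_cases h : n % 5 = j
    · rw [if_pos ((cond_iff j hj n hn).2 h), extend_eq j hj n h]
      simp [gBump, h]
    · rw [if_neg (fun hc => h ((cond_iff j hj n hn).1 hc))]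
      simp [gBump, h]

-- M lemmas for the abstract map step
lemma M_map_self (j : Nat) (L : List Nat) :
    M (L.map (gBump j)) j = 0 := by
  induction L with
  | nil => simp [M]
  | cons n L ih =>
    rw [List.map_cons, M_cons]
    have : (gBump j n) % 5 ≠ j := by unfold gBump; split <;> omega
    rw [if_neg this]; exact ih

lemma M_map_succ (j : Nat) (L : List Nat) (hpos : ∀ n ∈ L, 0 < n) :
    M (L.map (gBump j)) ((j + 1) % 5)
      = if M L j = 0 then M L ((j + 1) % 5) else max (M L ((j + 1) % 5)) (M L j + 1) := by
  induction L with
  | nil => simp [M]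
  | cons n L ih =>
    have hn : 0 < n := hpos n (by simp)
    have ih' := ih (fun m hm => hpos m (by simp [hm]))
    have hMj := M_nonneg L j
    have hMs := M_nonneg L ((j + 1) % 5)
    have hn1 : (1 : Int) ≤ (n : Int) := by exact_mod_cast hn
    rw [List.map_cons, M_cons, M_cons, M_cons, ih']
    by_cases h : n % 5 = j
    · have h2 : gBump j n = n + 1 := by unfold gBump; rw [if_pos h]
      rw [h2, if_pos (show (n + 1) % 5 = (j + 1) % 5 by omega), if_pos h]
      push_cast
      by_cases h0 : M L j = 0
      · rw [if_pos h0, if_neg (by rw [h0]; simp only [Int.max_def]; split_ifs <;> omega)]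
        rw [h0]
        by_cases hs : n % 5 = (j + 1) % 5
        · rw [if_pos hs]; simp only [Int.max_def]; split_ifs <;> omega
        · rw [if_neg hs]; simp only [Int.max_def]; split_ifs <;> omega
      · rw [if_neg h0, if_neg (by simp only [Int.max_def]; split_ifs <;> omega)]
        by_cases hs : n % 5 = (j + 1) % 5
        · rw [if_pos hs]; simp only [Int.max_def]; split_ifs <;> omega
        · rw [if_neg hs]; simp only [Int.max_def]; split_ifs <;> omega
    · have h1 : (gBump j n) = n := by unfold gBump; rw [if_neg h]
      rw [h1, if_neg h]
      by_cases hs : n % 5 = (j + 1) % 5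
      · rw [if_pos hs, if_pos hs]
        by_cases h0 : M L j = 0
        · rw [if_pos h0, if_pos h0]
        · rw [if_neg h0, if_neg h0]
          simp only [Int.max_def]; split_ifs <;> omega
      · rw [if_neg hs, if_neg hs]

lemma M_map_other (j r : Nat) (hrj : r ≠ j) (hrs : r ≠ (j + 1) % 5)
    (L : List Nat) : M (L.map (gBump j)) r = M L r := by
  induction L with
  | nil => simp
  | cons n L ih =>
    rw [List.map_cons, M_cons, M_cons, ih]
    by_cases h : n % 5 = j
    · have h2 : gBump j n = n + 1 := by unfold gBump; rw [if_pos h]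
      rw [h2, if_neg (show ¬ (n + 1) % 5 = r by omega),
        if_neg (fun hc => hrj (hc.symm.trans h))]
    · have h1 : (gBump j n) = n := by unfold gBump; rw [if_neg h]
      rw [h1]

-- shifting the fold base of M
lemma M_shift (L : List Nat) (r : Nat) (i : Int) (hi : 0 ≤ i) :
    L.foldr (fun n acc => if n % 5 = r then max (n : Int) acc else acc) i
      = max (M L r) i := by
  induction L with
  | nil => simp [M, max_eq_right hi]
  | cons n L ih =>
    rw [M_cons]
    show (if n % 5 = r then max (n : Int) (L.foldr _ i) else L.foldr _ i) = _
    split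
    · rw [ih, max_assoc]
    · exact ih

lemma M_append_one (L : List Nat) (r : Nat) :
    M (L ++ [1]) r = if r = 1 then max (M L r) 1 else M L r := by
  by_cases h : r = 1
  · subst h
    have := M_shift L 1 1 (by norm_num)
    simp only [M] at this ⊢
    simp only [List.foldr_append, List.foldr]
    norm_num
    exact this
  · rw [if_neg h]
    simp only [M, List.foldr_append, List.foldr]
    rw [if_neg (show ¬ (1 % 5 = r) by omega)]

-- overall max of the five classes equals the fold max over all lengths
def Fmax (L : List Nat) : Int := L.foldr (fun n acc => max (n : Int) acc) 0

lemma Fmax_cons (n : Nat) (L : List Nat) : Fmax (n :: L) = max (n : Int) (Fmax L) := rfl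

lemma max5_eq_Fmax (L : List Nat) :
    max (M L 0) (max (M L 1) (max (M L 2) (max (M L 3) (M L 4)))) = Fmax L := by
  induction L with
  | nil => simp [M, Fmax]
  | cons n L ih =>
    have h5 : n % 5 < 5 := Nat.mod_lt _ (by norm_num)
    rw [M_cons, M_cons, M_cons, M_cons, M_cons, Fmax_cons, ← ih]
    set r := n % 5 with hr
    interval_cases r <;> norm_num <;>
      simp only [max_left_comm]

lemma foldl_max_shift (t : List Int) : ∀ x : Int, 0 ≤ x →
    t.foldl max x = max x (t.foldr max 0) := by
  induction t with
  | nil => intro x hx; simp [max_eq_left hx]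
  | cons a t ih =>
    intro x hx
    simp only [List.foldl, List.foldr]
    rw [ih (max x a) (le_trans hx (le_max_left _ _)), max_assoc]

lemma Fmax_eq_foldr (L : List Nat) :
    (L.map (fun (n : Nat) => (n : Int))).foldr max 0 = Fmax L := by
  induction L with
  | nil => rfl
  | cons n L ih => simp only [List.map_cons, List.foldr, ih, Fmax_cons]

lemma maxq_eq_Fmax (L : List Nat) (hpos : ∀ n ∈ L, 0 < n) :
    (PySem.List.max? (L.map (fun (n : Nat) => (n : Int))) (fun y => y)).getD 0 = Fmax L := by
  cases L with
  | nil => rfl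
  | cons n L =>
    have hn : 0 < n := hpos n (by simp)
    simp only [List.map_cons, PySem.List.max?_id_cons, Option.getD_some]
    rw [foldl_max_shift (L.map (fun (n : Nat) => (n : Int))) (n : Int) (by positivity),
      Fmax_eq_foldr, Fmax_cons]

-- the five-tuple of class maxima
def M5 (L : List Nat) : Int × Int × Int × Int × Int := (M L 0, M L 1, M L 2, M L 3, M L 4)

lemma stepL_pos (j : Nat) (L : List Nat) (hpos : ∀ n ∈ L, 0 < n) :
    ∀ n ∈ stepL j L, 0 < n := by
  intro n hn
  simp only [stepL, List.mem_append, List.mem_map] at hn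
  rcases hn with ⟨m, hm, rfl⟩ | h
  · have := hpos m hm; unfold gBump; split <;> omega
  · split at h <;> simp_all

-- per-vowel step lemmas: A's step and B's step track stepL
lemma stepA_vowel (j : Nat) (hj : j < 5) (L : List Nat) (hpos : ∀ n ∈ L, 0 < n) :
    pvStepA (L.map chainOf) (pvAt j) = (stepL j L).map chainOf := by
  have hmem : pvAt j ∈ pvVowels := by interval_cases j <;> simp [pvAt, pvVowels]
  unfold pvStepA
  rw [if_pos hmem, stepA_map j hj L hpos]
  unfold stepL
  by_cases h0 : j = 0
  · subst h0
    simp [chainOf, List.range_succ, pvAt, pvVowels]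
  · have : pvAt j ≠ 'a' := by interval_cases j <;> simp_all [pvAt, pvVowels]
    simp [this, h0]

lemma stepB_vowel (j : Nat) (hj : j < 5) (L : List Nat) (hpos : ∀ n ∈ L, 0 < n) :
    pvStepB (M5 L) (pvAt j) = M5 (stepL j L) := by
  have hn0 := M_nonneg L 0
  have hn1 := M_nonneg L 1
  have hn2 := M_nonneg L 2
  have hn3 := M_nonneg L 3
  have hn4 := M_nonneg L 4
  interval_cases j
  · -- 'a'
    have hs : stepL 0 L = L.map (gBump 0) ++ [1] := by simp [stepL]
    have hS := M_map_succ 0 L hpos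
    have hA := M_map_self 0 L
    have hO2 := M_map_other 0 2 (by norm_num) (by norm_num) L
    have hO3 := M_map_other 0 3 (by norm_num) (by norm_num) L
    have hO4 := M_map_other 0 4 (by norm_num) (by norm_num) L
    norm_num at hS
    rw [show pvAt 0 = 'a' from by decide]
    show (_, _, _, _, _) = _
    simp only [M5, hs, M_append_one, hS, hA, hO2, hO3, hO4, Prod.mk.injEq]
    norm_num
    by_cases hz : M L 0 = 0 <;>
      simp only [hz, if_true, if_false] <;>
        (simp only [Int.max_def]; split_ifs <;> omega)
  · -- 'e'
    have hs : stepL 1 L = L.map (gBump 1) := by simp [stepL]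
    have hS := M_map_succ 1 L hpos
    have hA := M_map_self 1 L
    have hO0 := M_map_other 1 0 (by norm_num) (by norm_num) L
    have hO3 := M_map_other 1 3 (by norm_num) (by norm_num) L
    have hO4 := M_map_other 1 4 (by norm_num) (by norm_num) L
    norm_num at hS
    rw [show pvAt 1 = 'e' from by decide]
    show (_, _, _, _, _) = _
    simp only [M5, hs, hS, hA, hO0, hO3, hO4]
    simp only [Prod.mk.injEq]
    norm_num
  · -- 'i'
    have hs : stepL 2 L = L.map (gBump 2) := by simp [stepL]
    have hS := M_map_succ 2 L hpos
    have hA := M_map_self 2 L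
    have hO0 := M_map_other 2 0 (by norm_num) (by norm_num) L
    have hO1 := M_map_other 2 1 (by norm_num) (by norm_num) L
    have hO4 := M_map_other 2 4 (by norm_num) (by norm_num) L
    norm_num at hS
    rw [show pvAt 2 = 'i' from by decide]
    show (_, _, _, _, _) = _
    simp only [M5, hs, hS, hA, hO0, hO1, hO4]
    simp only [Prod.mk.injEq]
    norm_num
  · -- 'o'
    have hs : stepL 3 L = L.map (gBump 3) := by simp [stepL]
    have hS := M_map_succ 3 L hpos
    have hA := M_map_self 3 L
    have hO0 := M_map_other 3 0 (by norm_num) (by norm_num) L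
    have hO1 := M_map_other 3 1 (by norm_num) (by norm_num) L
    have hO2 := M_map_other 3 2 (by norm_num) (by norm_num) L
    norm_num at hS
    rw [show pvAt 3 = 'o' from by decide]
    show (_, _, _, _, _) = _
    simp only [M5, hs, hS, hA, hO0, hO1, hO2]
    simp only [Prod.mk.injEq]
    norm_num
  · -- 'u'
    have hs : stepL 4 L = L.map (gBump 4) := by simp [stepL]
    have hS := M_map_succ 4 L hpos
    have hA := M_map_self 4 L
    have hO1 := M_map_other 4 1 (by norm_num) (by norm_num) L
    have hO2 := M_map_other 4 2 (by norm_num) (by norm_num) L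
    have hO3 := M_map_other 4 3 (by norm_num) (by norm_num) L
    norm_num at hS
    rw [show pvAt 4 = 'u' from by decide]
    show (_, _, _, _, _) = _
    simp only [M5, hs, hS, hA, hO1, hO2, hO3]
    simp only [Prod.mk.injEq]
    norm_num

lemma main_fold (cs : List Char) : ∀ (L : List Nat), (∀ n ∈ L, 0 < n) →
    ∃ L', (∀ n ∈ L', 0 < n) ∧
      cs.foldl pvStepA (L.map chainOf) = L'.map chainOf ∧
      cs.foldl pvStepB (M5 L) = M5 L' := by
  induction cs with
  | nil => intro L h; exact ⟨L, h, rfl, rfl⟩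
  | cons c cs ih =>
    intro L h
    by_cases hv : c ∈ pvVowels
    · have : ∃ j, j < 5 ∧ c = pvAt j := by
        fin_cases hv
        · exact ⟨0, by norm_num, by decide⟩
        · exact ⟨1, by norm_num, by decide⟩
        · exact ⟨2, by norm_num, by decide⟩
        · exact ⟨3, by norm_num, by decide⟩
        · exact ⟨4, by norm_num, by decide⟩
      obtain ⟨j, hj, rfl⟩ := this
      simp only [List.foldl]
      rw [stepA_vowel j hj L h, stepB_vowel j hj L h]
      exact ih (stepL j L) (stepL_pos j L h)
    · have hA : pvStepA (L.map chainOf) c = L.map chainOf := by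
        unfold pvStepA; rw [if_neg hv]
      have hB : pvStepB (M5 L) c = M5 L := by
        have h1 : c ≠ 'a' := fun hc => hv (by simp [hc, pvVowels])
        have h2 : c ≠ 'e' := fun hc => hv (by simp [hc, pvVowels])
        have h3 : c ≠ 'i' := fun hc => hv (by simp [hc, pvVowels])
        have h4 : c ≠ 'o' := fun hc => hv (by simp [hc, pvVowels])
        have h5 : c ≠ 'u' := fun hc => hv (by simp [hc, pvVowels])
        simp [pvStepB, h1, h2, h3, h4, h5]
      simp only [List.foldl, hA, hB]
      exact ih L h

-- ===== VERDICT (by name: the statement is the Claim_ definition above) =====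
theorem get_the_vowels_1_spec : Claim_equal_get_the_vowels_1 := by
  intro word _
  unfold Spec_get_the_vowels_1 get_the_vowels_1 get_the_vowels_1_alt
  dsimp only
  obtain ⟨L', hpos, hA, hB⟩ := main_fold word.toList [] (by simp)
  simp only [List.map_nil] at hA
  have hM5 : M5 ([] : List Nat) = (0, 0, 0, 0, 0) := by simp [M5, M]
  rw [hA, ← hM5, hB]
  have : (L'.map chainOf).map (fun x => (x.length : Int)) = L'.map (fun (n : Nat) => (n : Int)) := by
    simp [chainOf_length, Function.comp]
  rw [this, maxq_eq_Fmax L' hpos]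
  simp only [M5]
  exact (max5_eq_Fmax L').symm
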